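-- pv_equiv track=rewrite | github.com/ChrisBehanAda/advent_of_code_2022 | python/advent_of_code_2022/advent_of_code_2022/day5/day5.py | get_crate_lines
-- ===== SOURCE A (Python) =====
-- def get_crate_lines(lines: list[str]) -> list[str]:
--     reached_crate_label = False
--     crate_lines = []
--     for l in lines:
--         if "1" in l:
--             reached_crate_label = True
--         if reached_crate_label:
--             crate_lines.append(l)
--             break
--         else:
--             crate_lines.append(l)
--     return crate_lines
-- ===== SOURCE B (Python) =====
-- def get_crate_lines(lines: list[str]) -> list[str]:
--     i = next((i for i, l in enumerate(lines) if "1" in l), None)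
--     return lines[:] if i is None else lines[:i + 1]
-- ===== Notes on version B (the rewrite author's own statement) =====
-- stated objective: simpler
-- what changed: Replaces A's flag-and-append loop (with break) by finding the index of the first line containing '1' and returning a single bulk slice up to and including it (or a copy of all lines).
import Mathlib
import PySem

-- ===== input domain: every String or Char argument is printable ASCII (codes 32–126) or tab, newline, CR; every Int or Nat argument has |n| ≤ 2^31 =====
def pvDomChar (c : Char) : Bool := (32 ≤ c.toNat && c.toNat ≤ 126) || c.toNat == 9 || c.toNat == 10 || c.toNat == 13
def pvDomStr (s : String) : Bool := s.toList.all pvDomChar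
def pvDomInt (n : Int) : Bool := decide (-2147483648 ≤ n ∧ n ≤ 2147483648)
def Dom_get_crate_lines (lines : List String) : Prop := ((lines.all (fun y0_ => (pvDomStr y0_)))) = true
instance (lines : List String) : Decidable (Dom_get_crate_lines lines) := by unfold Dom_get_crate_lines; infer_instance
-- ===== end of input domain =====

-- B replaces A's flag-and-append loop with find-first-index-then-slice; same return value, simpler decomposition.


-- ===== PORT A =====
-- the loop: carries the reached_crate_label flag and the accumulated crate_lines; 'break' = returning acc without recursing
def getCrateLoop (reached : Bool) (acc : List String) : List String → List String
  | [] => acc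
  | l :: rest =>
    let reached := if PySem.Str.isIn "1" l then true else reached
    if reached then acc ++ [l]
    else getCrateLoop reached (acc ++ [l]) rest

def get_crate_lines (lines : List String) : List String :=
  getCrateLoop false [] lines

-- ===== PORT B =====
def get_crate_lines_alt (lines : List String) : List String :=
  match lines.findIdx? (fun l => PySem.Str.isIn "1" l) with
  | some i => PySem.List.slice lines none (some ((i : Int) + 1))
  | none => PySem.List.slice lines none none

-- ===== PRECONDITION & SPEC =====
def Spec_get_crate_lines (lines : List String) (out : List String) : Prop := out = get_crate_lines_alt lines
instance (lines : List String) (out : List String) : Decidable (Spec_get_crate_lines lines out) := by unfold Spec_get_crate_lines; infer_instance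

-- ===== CLAIM (what is proved, stated in full; the proofs are below) =====
def Claim_equal_get_crate_lines : Prop := ∀ (lines : List String), Dom_get_crate_lines lines → Spec_get_crate_lines lines (get_crate_lines lines)

-- ===== LEMMAS AND PROOFS =====

-- B unfolded one element at a time
lemma alt_cons (l : String) (rest : List String) :
    get_crate_lines_alt (l :: rest) =
      if PySem.Str.isIn "1" l then [l] else l :: get_crate_lines_alt rest := by
  unfold get_crate_lines_alt
  by_cases h : PySem.Str.isIn "1" l
  · have h' : PySem.Chars.isIn ['1'] l.toList = true := h
    simp [List.findIdx?_cons, h', PySem.List.slice, PySem.List.clampIdx]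
  · have h' : PySem.Chars.isIn ['1'] l.toList = false := Bool.eq_false_iff.mpr h
    simp only [List.findIdx?_cons]
    cases hf : rest.findIdx? (fun l => PySem.Str.isIn "1" l) with
    | none => simp [h', PySem.List.slice_none_none]
    | some i =>
        simp only [Option.map_some, if_neg h]
        have h1 : ((i : Int) + 1) = (((i + 1 : Nat) : Int)) := by push_cast; ring
        have h2 : (((i + 1 : Nat) : Int) + 1) = (((i + 2 : Nat) : Int)) := by push_cast; ring
        rw [h1, h2, PySem.List.slice_to_natCast, PySem.List.slice_to_natCast]
        simp

-- A's loop with flag false appends exactly B's result onto its accumulator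
lemma loop_eq_alt (lines acc : List String) :
    getCrateLoop false acc lines = acc ++ get_crate_lines_alt lines := by
  induction lines generalizing acc with
  | nil => simp [getCrateLoop, get_crate_lines_alt, PySem.List.slice_none_none]
  | cons l rest ih =>
      rw [alt_cons]
      by_cases h : PySem.Str.isIn "1" l
      · have h' : PySem.Chars.isIn ['1'] l.toList = true := h
        simp [getCrateLoop, h']
      · have h' : PySem.Chars.isIn ['1'] l.toList = false := Bool.eq_false_iff.mpr h
        simp only [getCrateLoop, if_neg h]
        rw [ih]
        simp
-- ===== VERDICT (by name: the statement is the Claim_ definition above) =====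
theorem get_crate_lines_spec : Claim_equal_get_crate_lines := by
  intro lines _
  unfold Spec_get_crate_lines get_crate_lines
  simpa using loop_eq_alt lines []
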